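-- pv_equiv track=rewrite | github.com/Evgeny122/test | hm1.py | bananas
-- ===== SOURCE A (Python) =====
-- import itertools
-- import itertools
--
-- def bananas(string):
--     result = set()
--
--     for combm in itertools.combinations(range(len(string)), len(string) - 6):
--         arr = list(string)
--
--         for i in combm:
--             arr[i] = '-'
--
--         candidate = ''.join(arr)
--
--         if candidate.replace('-', '') == 'banana':
--             result.add(candidate)
--
--     return result
-- ===== SOURCE B (Python) =====
-- def bananas(string):
--     # Backtracking over subsequence matches of "banana": each distinct match of
--     # positions yields exactly one candidate (matched chars kept, rest '-').
--     target = "banana"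
--     if len(string) < len(target):
--         raise ValueError("need at least 6 characters")
--     result = set()
--
--     def go(i, j, prefix):
--         if j == len(target):
--             result.add(prefix + '-' * (len(string) - i))
--             return
--         if len(string) - i < len(target) - j:
--             return
--         go(i + 1, j, prefix + '-')
--         if string[i] == target[j]:
--             go(i + 1, j + 1, prefix + string[i])
--
--     go(0, 0, '')
--     return result
-- ===== Notes on version B (the rewrite author's own statement) =====
-- stated objective: faster
-- what changed: A tries every C(n, n-6) combination of positions to blank and filters; B backtracks over the subsequence matches of 'banana' directly, emitting each surviving candidate exactly once.
import Mathlib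
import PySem

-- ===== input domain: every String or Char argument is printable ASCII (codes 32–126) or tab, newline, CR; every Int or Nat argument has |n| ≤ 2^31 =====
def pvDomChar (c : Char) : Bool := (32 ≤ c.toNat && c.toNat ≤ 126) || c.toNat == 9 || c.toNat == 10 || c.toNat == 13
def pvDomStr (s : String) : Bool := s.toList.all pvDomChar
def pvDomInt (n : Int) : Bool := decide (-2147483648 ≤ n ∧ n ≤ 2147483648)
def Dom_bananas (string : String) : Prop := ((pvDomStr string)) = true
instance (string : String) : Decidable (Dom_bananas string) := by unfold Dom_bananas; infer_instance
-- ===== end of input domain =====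

-- B replaces A's scan of all C(n, n-6) index combinations by a backtracking
-- enumeration of the subsequence matches of "banana" (objective: faster).

-- ===== PORT A =====
-- itertools.combinations(l, r) in lexicographic order (exact transliteration helper)
def pyCombos : List Nat → Nat → List (List Nat)
  | _, 0 => [[]]
  | [], _ + 1 => []
  | x :: xs, r + 1 => (pyCombos xs r).map (x :: ·) ++ pyCombos xs (r + 1)

def bananas (string : String) : List String :=
  let cs := string.toList
  let n := cs.length
  (pyCombos (List.range n) (n - 6)).foldl
    (fun result combm =>
      let arr := combm.foldl (fun a i => a.set i '-') cs
      let candidate := String.ofList arr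
      if PySem.Str.replace candidate "-" "" == "banana" then PySem.Set.add result candidate
      else result)
    PySem.Set.empty

-- ===== PORT B =====
-- backtracking: go(i, j, prefix) over (suffix of string, suffix of target)
def bananasGo : List Char → List Char → List Char → PySem.Set String → PySem.Set String
  | s, [], pre, result => PySem.Set.add result (String.ofList (pre ++ List.replicate s.length '-'))
  | [], _ :: _, _, result => result          -- the length prune fires: 0 < len(t)+1
  | x :: s', c :: t, pre, result =>
    if s'.length + 1 < t.length + 1 then result
    else
      let r1 := bananasGo s' (c :: t) (pre ++ ['-']) result
      if x = c then bananasGo s' t (pre ++ [x]) r1 else r1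

def bananas_alt (string : String) : List String :=
  bananasGo string.toList "banana".toList [] PySem.Set.empty

-- ===== PRECONDITION & SPEC =====
-- Pre_ excludes strings shorter than 6, on which A raises ValueError (combinations with negative r).
def Pre_bananas (string : String) : Prop := 6 ≤ string.length
instance (string : String) : Decidable (Pre_bananas string) := by unfold Pre_bananas; infer_instance
def pvWitness_bananas : String := "xbanana"

def Spec_bananas (string : String) (out : List String) : Prop := out = bananas_alt string
instance (string : String) (out : List String) : Decidable (Spec_bananas string out) := by unfold Spec_bananas; infer_instance

-- ===== CLAIM (what is proved, stated in full; the proofs are below) =====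
def Claim_equal_bananas : Prop := ∀ (string : String), Dom_bananas string → Pre_bananas string → Spec_bananas string (bananas string)

-- ===== LEMMAS AND PROOFS =====

-- all candidates from matching "banana"-suffix t as a subsequence of s (matched chars kept, rest '-')
def pvPaths : List Char → List Char → List (List Char)
  | s, [] => [List.replicate s.length '-']
  | [], _ :: _ => []
  | x :: s, c :: t =>
    (pvPaths s (c :: t)).map ('-' :: ·) ++ (if x = c then (pvPaths s t).map (x :: ·) else [])

-- all ways to blank exactly r positions of s
def pvBlanks : List Char → Nat → List (List Char)
  | s, 0 => [s]
  | [], _ + 1 => []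
  | x :: s, r + 1 => (pvBlanks s r).map ('-' :: ·) ++ (pvBlanks s (r + 1)).map (x :: ·)

theorem pv_ofList_beq (l : List Char) (s : String) : (String.ofList l == s) = (l == s.toList) := by
  by_cases h : l = s.toList
  · subst h; simp
  · have h2 : String.ofList l ≠ s := fun hh => h (by rw [← hh]; simp)
    simp [h, h2]

theorem pvPaths_nil_of_lt (s : List Char) : ∀ t : List Char, s.length < t.length → pvPaths s t = [] := by
  induction s with
  | nil =>
    intro t h; cases t with
    | nil => simp at h
    | cons c t => simp [pvPaths]
  | cons x s ih =>
    intro t h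
    cases t with
    | nil => simp at h
    | cons c t =>
      simp only [pvPaths]
      rw [ih (c :: t) (by simp at h ⊢; omega)]
      rcases Nat.lt_or_ge s.length t.length with h2 | h2
      · rw [ih t h2]; simp
      · simp at h; omega

theorem pvBlanks_nil_of_gt (s : List Char) : ∀ r : Nat, s.length < r → pvBlanks s r = [] := by
  induction s with
  | nil =>
    intro r h; cases r with
    | zero => simp at h
    | succ r => simp [pvBlanks]
  | cons x s ih =>
    intro r h
    cases r with
    | zero => simp at h
    | succ r =>
      simp only [pvBlanks]
      rw [ih r (by simp at h; omega), ih (r+1) (by simp at h ⊢; omega)]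
      simp

theorem pvBlanks_count (s : List Char) : ∀ (r : Nat) (c : List Char), c ∈ pvBlanks s r →
    (c.filter (fun a => !(a == '-'))).length + r ≤ s.length := by
  induction s with
  | nil =>
    intro r c h
    cases r with
    | zero => simp [pvBlanks] at h; subst h; simp
    | succ r => simp [pvBlanks] at h
  | cons x s ih =>
    intro r c h
    cases r with
    | zero =>
      simp [pvBlanks] at h; subst h
      have := List.length_filter_le (fun a => !(a == '-')) (x :: s)
      simpa using this
    | succ r =>
      simp only [pvBlanks, List.mem_append, List.mem_map] at h
      rcases h with ⟨d, hd, rfl⟩ | ⟨d, hd, rfl⟩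
      · have := ih r d hd
        simp only [List.filter_cons]
        norm_num
        omega
      · have := ih (r+1) d hd
        simp only [List.filter_cons]
        by_cases hx : x = '-'
        · simp [hx] at *; omega
        · simp [hx] at *; omega

theorem pvCombos_map_succ (l : List Nat) : ∀ r : Nat,
    pyCombos (l.map Nat.succ) r = (pyCombos l r).map (List.map Nat.succ) := by
  induction l with
  | nil => intro r; cases r <;> simp [pyCombos]
  | cons x l ih =>
    intro r
    cases r with
    | zero => simp [pyCombos]
    | succ r =>
      simp only [List.map_cons, pyCombos, ih]
      simp [List.map_map, Function.comp_def]

theorem pv_set_succ (S : List Nat) : ∀ (x : Char) (cs : List Char),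
    (S.map Nat.succ).foldl (fun a i => a.set i '-') (x :: cs)
      = x :: S.foldl (fun a i => a.set i '-') cs := by
  induction S with
  | nil => intro x cs; simp
  | cons i S ih =>
    intro x cs
    simp only [List.map_cons, List.foldl_cons, List.set_cons_succ]
    exact ih x _

theorem pv_combos_blanks (cs : List Char) : ∀ r : Nat,
    (pyCombos (List.range cs.length) r).map (fun S => S.foldl (fun a i => a.set i '-') cs)
      = pvBlanks cs r := by
  induction cs with
  | nil =>
    intro r
    cases r with
    | zero => simp [pyCombos, pvBlanks]
    | succ r => simp [pyCombos, pvBlanks]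
  | cons x cs ih =>
    intro r
    cases r with
    | zero => simp [pyCombos, pvBlanks]
    | succ r =>
      have hrange : List.range (x :: cs).length = 0 :: (List.range cs.length).map Nat.succ := by
        simp [List.range_succ_eq_map]
      rw [hrange]
      simp only [pyCombos, pvCombos_map_succ, List.map_append, List.map_map, pvBlanks]
      congr 1
      · rw [← ih r]
        simp only [List.map_map]
        apply List.map_congr_left
        intro S _
        simp only [Function.comp_def, List.foldl_cons, List.set_cons_zero]
        exact pv_set_succ S '-' cs
      · rw [← ih (r+1)]
        simp only [List.map_map]
        apply List.map_congr_left
        intro S _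
        simp only [Function.comp_def]
        exact pv_set_succ S x cs

theorem pv_replace_go (fuel : Nat) : ∀ (l acc : List Char), l.length ≤ fuel →
    PySem.Chars.replace.go ['-'] [] fuel l acc = acc.reverse ++ l.filter (fun a => !(a == '-')) := by
  induction fuel with
  | zero =>
    intro l acc h
    have : l = [] := by cases l <;> simp_all
    subst this
    simp [PySem.Chars.replace.go]
  | succ fuel ih =>
    intro l acc h
    cases l with
    | nil => simp [PySem.Chars.replace.go]
    | cons c t =>
      rw [PySem.Chars.replace.go]
      by_cases hc : c = '-'
      · subst hc
        simp only [List.isPrefixOf, BEq.rfl, Bool.true_and, if_pos, List.length_cons,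
          List.length_nil, List.drop_succ_cons, List.drop_zero, List.reverse_nil, List.nil_append]
        rw [ih t acc (by simpa using h)]
        simp
      · have hpre : List.isPrefixOf ['-'] (c :: t) = false := by
          simp [List.isPrefixOf]; exact fun h' => hc h'.symm
        rw [hpre]
        simp only [Bool.false_eq_true, if_false]
        rw [ih t (c :: acc) (by simpa using h)]
        simp [hc]

theorem pv_replace_dash (l : List Char) :
    PySem.Chars.replace l ['-'] [] = l.filter (fun a => !(a == '-')) := by
  rw [PySem.Chars.replace]
  simp only [List.isEmpty_cons, Bool.false_eq_true, if_false]
  rw [pv_replace_go l.length l [] le_rfl]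
  simp

theorem pv_filter_blanks (s : List Char) : ∀ (t : List Char) (r : Nat), '-' ∉ t →
    t.length ≤ s.length → r = s.length - t.length →
    (pvBlanks s r).filter (fun c => c.filter (fun a => !(a == '-')) == t) = pvPaths s t := by
  induction s with
  | nil =>
    intro t r hd hl hr
    have ht : t = [] := by cases t <;> simp_all
    subst ht
    simp at hr; subst hr
    simp [pvBlanks, pvPaths]
  | cons x s ih =>
    intro t r hd hl hr
    cases t with
    | nil =>
      -- r = s.length + 1
      simp only [List.length_nil, Nat.sub_zero, List.length_cons] at hr
      subst hr
      simp only [pvBlanks, pvPaths]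
      rw [List.filter_append]
      have h2 : pvBlanks s (s.length + 1) = [] := pvBlanks_nil_of_gt s _ (by omega)
      rw [h2]
      have h1 : (pvBlanks s s.length).filter
          (fun c => c.filter (fun a => !(a == '-')) == ([] : List Char)) = pvPaths s [] := by
        exact ih [] s.length (by simp) (by simp) (by simp)
      rw [List.filter_map, List.filter_map]
      have : (List.filter ((fun c => c.filter (fun a => !(a == '-')) == ([] : List Char)) ∘ ('-' :: ·))
          (pvBlanks s s.length)) = (pvBlanks s s.length).filter
          (fun c => c.filter (fun a => !(a == '-')) == ([] : List Char)) := by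
        apply List.filter_congr
        intro c _
        simp
      rw [this, h1]
      simp [pvPaths, List.replicate_succ]
    | cons c t =>
      cases r with
      | zero =>
        -- lengths equal
        have hlen : (x :: s).length = (c :: t).length := by
          simp at hl hr ⊢; omega
        have hlen : s.length = t.length := by simp at hl hr; omega
        have hps : pvPaths s (c :: t) = [] := pvPaths_nil_of_lt s (c :: t) (by simp; omega)
        simp only [pvBlanks, pvPaths, hps, List.map_nil, List.nil_append]
        by_cases hx : x = c
        · have hcd : c ≠ '-' := fun h' => hd (List.mem_cons.mpr (Or.inl h'.symm))
          have hxd : x ≠ '-' := hx ▸ hcd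
          rw [if_pos hx]
          have hps2 : pvPaths s t = (pvBlanks s 0).filter
              (fun cand => cand.filter (fun a => !(a == '-')) == t) :=
            (ih t 0 (fun h' => hd (List.mem_cons_of_mem c h')) (by omega) (by omega)).symm
          rw [hps2]
          simp only [pvBlanks]
          by_cases hft : s.filter (fun a => !(a == '-')) = t
          · simp [hx, hft, hcd]
          · simp [hx, hft, hcd]
        · rw [if_neg hx]
          by_cases hxd : x = '-'
          · subst hxd
            have hcnt := List.length_filter_le (fun a => !(a == '-')) s
            have hne : List.filter (fun a => !(a == '-')) ('-' :: s) ≠ c :: t := by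
              simp only [List.filter_cons]
              rw [if_neg (by simp)]
              intro hcontra
              have := congrArg List.length hcontra
              simp at this
              omega
            simp only [hne, ne_eq] at *
            simp
            intro hcontra
            have := congrArg List.length hcontra
            simp at this
            omega
          · have hne : List.filter (fun a => !(a == '-')) (x :: s) ≠ c :: t := by
              simp only [List.filter_cons]
              rw [if_pos (by simpa using hxd)]
              intro hcontra
              exact hx (by injection hcontra)
            simp [hne]
      | succ r =>
        have hts : t.length < s.length := by simp at hl hr ⊢; omega
        simp only [pvBlanks, pvPaths]
        rw [List.filter_append, List.filter_map, List.filter_map]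
        have hfirst : (List.filter ((fun cand => cand.filter (fun a => !(a == '-')) == (c :: t)) ∘ ('-' :: ·))
            (pvBlanks s r)) = pvPaths s (c :: t) := by
          have hcong : List.filter ((fun cand => cand.filter (fun a => !(a == '-')) == (c :: t)) ∘ ('-' :: ·))
              (pvBlanks s r) = List.filter (fun cand => cand.filter (fun a => !(a == '-')) == (c :: t))
              (pvBlanks s r) := by
            apply List.filter_congr
            intro cand _
            simp
          rw [hcong]
          exact ih (c :: t) r hd (by simpa using hts) (by simp at hr ⊢; omega)
        rw [hfirst]
        congr 1
        by_cases hx : x = c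
        · have hcd : c ≠ '-' := fun h' => hd (List.mem_cons.mpr (Or.inl h'.symm))
          have hxd : x ≠ '-' := hx ▸ hcd
          rw [if_pos hx]
          have hcong : List.filter ((fun cand => cand.filter (fun a => !(a == '-')) == (c :: t)) ∘ (x :: ·))
              (pvBlanks s (r+1)) = List.filter (fun cand => cand.filter (fun a => !(a == '-')) == t)
              (pvBlanks s (r+1)) := by
            apply List.filter_congr
            intro cand _
            show ((x :: cand).filter (fun a => !(a == '-')) == (c :: t)) =
              (cand.filter (fun a => !(a == '-')) == t)
            simp only [List.filter_cons]
            rw [if_pos (by simpa using hxd)]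
            simp [hx]
          rw [hcong]
          rw [ih t (r+1) (fun h' => hd (List.mem_cons_of_mem c h')) (by omega) (by simp at hr ⊢; omega)]
        · rw [if_neg hx]
          have hnil : List.filter ((fun cand => List.filter (fun a => !(a == '-')) cand == (c :: t)) ∘ (x :: ·))
              (pvBlanks s (r+1)) = [] := by
            apply List.filter_eq_nil_iff.mpr
            intro d hdmem
            by_cases hxd : x = '-'
            · subst hxd
              have hcount := pvBlanks_count s (r+1) d hdmem
              simp only [Function.comp_apply, List.filter_cons]
              rw [if_neg (by simp)]
              simp only [beq_iff_eq]
              intro hcontra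
              have := congrArg List.length hcontra
              simp only [List.length_cons] at this
              simp at hr
              omega
            · simp only [Function.comp_apply, List.filter_cons]
              rw [if_pos (by simpa using hxd)]
              simp only [beq_iff_eq]
              intro hcontra
              exact hx (by injection hcontra)
          rw [hnil, List.map_nil]

theorem pv_foldl_if_add {α : Type} (g : α → String) (P : String → Bool) (l : List α) :
    ∀ (init : PySem.Set String),
      l.foldl (fun res m => if P (g m) then PySem.Set.add res (g m) else res) init
        = ((l.map g).filter P).foldl PySem.Set.add init := by
  induction l with
  | nil => intro init; simp
  | cons a l ih =>
    intro init
    simp only [List.foldl_cons, List.map_cons, List.filter_cons]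
    by_cases h : P (g a)
    · rw [if_pos h, if_pos h, List.foldl_cons]
      exact ih _
    · rw [if_neg h, if_neg (by simpa using h)]
      exact ih init

theorem pv_go_spec (s : List Char) : ∀ (t pre : List Char) (result : PySem.Set String),
    bananasGo s t pre result
      = ((pvPaths s t).map (fun c => String.ofList (pre ++ c))).foldl PySem.Set.add result := by
  induction s with
  | nil =>
    intro t pre result
    cases t with
    | nil => simp [bananasGo, pvPaths]
    | cons c t => simp [bananasGo, pvPaths]
  | cons x s ih =>
    intro t pre result
    cases t with
    | nil => simp [bananasGo, pvPaths]
    | cons c t =>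
      simp only [bananasGo]
      by_cases hlt : s.length + 1 < t.length + 1
      · rw [if_pos hlt]
        have h1 : pvPaths (x :: s) (c :: t) = [] := pvPaths_nil_of_lt _ _ (by simp; omega)
        rw [h1]; simp
      · rw [if_neg hlt]
        simp only [pvPaths, List.map_append, List.foldl_append]
        rw [ih (c :: t) (pre ++ ['-']) result]
        by_cases hx : x = c
        · rw [if_pos hx]
          rw [ih t (pre ++ [x]) _]
          simp [List.map_map, Function.comp_def, List.append_assoc, hx]
        · rw [if_neg hx]
          simp [List.map_map, Function.comp_def, List.append_assoc, hx]


-- ===== VERDICT (by name: the statement is the Claim_ definition above) =====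
theorem bananas_spec : Claim_equal_bananas := by
  intro string _ hpre
  unfold Spec_bananas bananas bananas_alt
  dsimp only
  rw [pv_go_spec]
  have hlen : 6 ≤ string.toList.length := by simpa using hpre
  rw [pv_foldl_if_add (fun combm => String.ofList (List.foldl (fun a i => a.set i '-') string.toList combm))
      (fun cand => PySem.Str.replace cand "-" "" == "banana")
      (pyCombos (List.range string.toList.length) (string.toList.length - 6)) PySem.Set.empty]
  rw [show (pyCombos (List.range string.toList.length) (string.toList.length - 6)).map
        (fun combm => String.ofList (combm.foldl (fun a i => a.set i '-') string.toList))
      = (pvBlanks string.toList (string.toList.length - 6)).map String.ofList by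
    rw [← pv_combos_blanks string.toList (string.toList.length - 6), List.map_map]; rfl]
  rw [List.filter_map]
  have hpred : List.filter ((fun cand => PySem.Str.replace cand "-" "" == "banana") ∘ String.ofList)
      (pvBlanks string.toList (string.toList.length - 6))
      = List.filter (fun c => c.filter (fun a => !(a == '-')) == "banana".toList)
        (pvBlanks string.toList (string.toList.length - 6)) := by
    apply List.filter_congr
    intro cand _
    show (PySem.Str.replace (String.ofList cand) "-" "" == "banana") = _
    rw [PySem.Str.replace]
    have : (String.ofList cand).toList = cand := by simp
    rw [this]
    rw [show ("-" : String).toList = ['-'] from rfl, show ("" : String).toList = [] from rfl]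
    rw [pv_replace_dash]
    exact pv_ofList_beq _ _
  rw [hpred]
  rw [pv_filter_blanks string.toList "banana".toList (string.toList.length - 6)
    (by decide) (by simpa using hlen) (by simp)]
  simp
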